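-- pv_equiv track=rewrite | github.com/MrBrantCode/unitest_baseline | mut_generate/mist_train_taco/taco_8282/solution.py | count_subsequences_of_101
-- ===== SOURCE A (Python) =====
-- def count_subsequences_of_101(s: str) -> int:
--     sub = '101'
--     m, n = len(s), len(sub)
--     table = [0] * n
--
--     for i in range(m):
--         previous = 1
--         for j in range(n):
--             current = table[j]
--             if s[i] == sub[j]:
--                 table[j] += previous
--             previous = current
--
--     return table[n-1] if n else 1
-- ===== SOURCE B (Python) =====
-- def count_subsequences_of_101(s: str) -> int:
--     total_ones = s.count('1')
--     ones_before = 0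
--     result = 0
--     for c in s:
--         if c == '0':
--             result += ones_before * (total_ones - ones_before)
--         elif c == '1':
--             ones_before += 1
--     return result
-- ===== Notes on version B (the rewrite author's own statement) =====
-- stated objective: faster
-- what changed: Replaces the per-character 3-cell subsequence-DP table with a combinatorial pivot count: for each zero character, add (ones to its left) * (ones to its right), using one precomputed total count of ones.
import Mathlib
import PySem

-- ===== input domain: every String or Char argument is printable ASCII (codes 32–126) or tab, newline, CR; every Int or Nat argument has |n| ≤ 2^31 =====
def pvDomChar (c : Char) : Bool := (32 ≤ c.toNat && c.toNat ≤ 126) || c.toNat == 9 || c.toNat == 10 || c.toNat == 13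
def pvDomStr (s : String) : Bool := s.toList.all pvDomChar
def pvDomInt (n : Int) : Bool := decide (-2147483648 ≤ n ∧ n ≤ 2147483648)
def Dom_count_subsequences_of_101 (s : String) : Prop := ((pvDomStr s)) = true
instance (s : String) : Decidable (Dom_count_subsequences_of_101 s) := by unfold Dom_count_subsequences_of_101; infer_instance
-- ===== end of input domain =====

-- B replaces A's per-character subsequence-DP table update with a pivot count:
-- for each '0', ones-to-the-left * ones-to-the-right (constant-factor faster).

-- ===== PORT A =====
-- inner loop 'for j in range(n)': walk sub and table in lockstep, threading 'previous'
def pvInnerA (c : Char) : List Char → List Int → Int → List Int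
  | subj :: subs, t :: ts, previous =>
      (if c = subj then t + previous else t) :: pvInnerA c subs ts t
  | _, ts, _ => ts

def count_subsequences_of_101 (s : String) : Int :=
  let sub := "101"
  let table : List Int := [0, 0, 0]
  let final := s.toList.foldl (fun table c => pvInnerA c sub.toList table 1) table
  PySem.List.pyGetD final 2 0    -- table[n-1] with n = 3 (n ≠ 0, so the else-branch '1' is dead)

-- ===== PORT B =====
def count_subsequences_of_101_alt (s : String) : Int :=
  let totalOnes : Int := PySem.Str.count s "1"
  let st := s.toList.foldl
    (fun (st : Int × Int) c =>
      if c = '0' then (st.1, st.2 + st.1 * (totalOnes - st.1))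
      else if c = '1' then (st.1 + 1, st.2)
      else st)
    (0, 0)
  st.2

-- ===== PRECONDITION & SPEC =====
def Spec_count_subsequences_of_101 (s : String) (out : Int) : Prop := out = count_subsequences_of_101_alt s
instance (s : String) (out : Int) : Decidable (Spec_count_subsequences_of_101 s out) := by unfold Spec_count_subsequences_of_101; infer_instance

-- ===== CLAIM (what is proved, stated in full; the proofs are below) =====
def Claim_equal_count_subsequences_of_101 : Prop := ∀ (s : String), Dom_count_subsequences_of_101 s → Spec_count_subsequences_of_101 s (count_subsequences_of_101 s)

-- ===== LEMMAS AND PROOFS =====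

-- A's fold, rewritten on explicit triples (a, b, d) = (table[0], table[1], table[2])
def pvStepA (st : Int × Int × Int) (c : Char) : Int × Int × Int :=
  (if c = '1' then st.1 + 1 else st.1,
   if c = '0' then st.2.1 + st.1 else st.2.1,
   if c = '1' then st.2.2 + st.2.1 else st.2.2)

lemma pvInnerA_eval (c : Char) (a b d : Int) :
    pvInnerA c ['1', '0', '1'] [a, b, d] 1 =
      [if c = '1' then a + 1 else a, if c = '0' then b + a else b, if c = '1' then d + b else d] := by
  simp [pvInnerA]

lemma pvFoldA_triple (l : List Char) (a b d : Int) :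
    l.foldl (fun table c => pvInnerA c "101".toList table 1) [a, b, d] =
      [(l.foldl pvStepA (a, b, d)).1, (l.foldl pvStepA (a, b, d)).2.1, (l.foldl pvStepA (a, b, d)).2.2] := by
  induction l generalizing a b d with
  | nil => rfl
  | cons c l ih =>
      show (l.foldl _ (pvInnerA c ['1','0','1'] [a,b,d] 1)) = _
      rw [pvInnerA_eval]
      rw [ih]
      simp [List.foldl_cons, pvStepA]

def pvStepB (T : Int) (st : Int × Int) (c : Char) : Int × Int :=
  if c = '0' then (st.1, st.2 + st.1 * (T - st.1))
  else if c = '1' then (st.1 + 1, st.2)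
  else st

-- invariant: with T - ones = number of '1's still to come, B's running result r
-- equals A's table[2] plus table[1] * (ones still to come)
lemma pvKey (l : List Char) (T a b d r : Int)
    (hT : a + (l.count '1' : Int) = T) (hr : r = d + b * (l.count '1' : Int)) :
    (l.foldl (pvStepB T) (a, r)).2 = (l.foldl pvStepA (a, b, d)).2.2 := by
  induction l generalizing a b d r with
  | nil =>
      simp at hr
      simp [hr]
  | cons c l ih =>
      by_cases h0 : c = '0'
      · subst h0
        simp at hT hr
        rw [List.foldl_cons, List.foldl_cons]
        show (l.foldl (pvStepB T) (pvStepB T (a, r) '0')).2 = (l.foldl pvStepA (pvStepA (a,b,d) '0')).2.2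
        simp only [pvStepB, pvStepA]
        norm_num
        exact ih a (b + a) d _ hT (by rw [hr]; have : T = a + (l.count '1' : Int) := hT.symm; rw [this]; ring)
      · by_cases h1 : c = '1'
        · subst h1
          simp at hT hr
          rw [List.foldl_cons, List.foldl_cons]
          show (l.foldl (pvStepB T) (pvStepB T (a, r) '1')).2 = (l.foldl pvStepA (pvStepA (a,b,d) '1')).2.2
          simp only [pvStepB, pvStepA]
          norm_num
          exact ih (a + 1) b (d + b) r (by omega) (by rw [hr]; ring)
        · simp [h1] at hT hr
          rw [List.foldl_cons, List.foldl_cons]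
          show (l.foldl (pvStepB T) (pvStepB T (a, r) c)).2 = (l.foldl pvStepA (pvStepA (a,b,d) c)).2.2
          simp only [pvStepB, pvStepA, if_neg h0, if_neg h1]
          exact ih a b d r hT hr

-- B's foldl literally is a foldl of pvStepB
lemma pvAltFold (s : String) :
    count_subsequences_of_101_alt s =
      (s.toList.foldl (pvStepB (PySem.Str.count s "1")) (0, 0)).2 := by
  unfold count_subsequences_of_101_alt pvStepB
  rfl

lemma pvCountGo1 : ∀ (fuel : Nat) (l : List Char) (acc : Nat), l.length ≤ fuel →
    PySem.Chars.count.go ['1'] fuel l acc = acc + l.count '1' := by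
  intro fuel
  induction fuel with
  | zero => intro l acc h; simp at h; simp [h, PySem.Chars.count.go]
  | succ n ih =>
    intro l acc h
    cases l with
    | nil => simp [PySem.Chars.count.go]
    | cons c t =>
      rw [PySem.Chars.count.go]
      by_cases hc : c = '1'
      · subst hc
        simp [List.isPrefixOf, ih t (acc + 1) (by simpa using Nat.lt_succ_iff.mp (by simpa using h))]
        omega
      · simp [List.isPrefixOf, Ne.symm hc, hc, ih t acc (by simpa using Nat.lt_succ_iff.mp (by simpa using h))]

lemma pvCountOnes (s : String) : (PySem.Str.count s "1" : Int) = (s.toList.count '1' : Int) := by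
  have : PySem.Str.count s "1" = s.toList.count '1' := by
    rw [PySem.Str.count_eq]
    show PySem.Chars.count s.toList ['1'] = _
    rw [PySem.Chars.count]
    simp only [List.isEmpty_cons, if_false, Bool.false_eq_true]
    rw [pvCountGo1 s.toList.length s.toList 0 le_rfl]
    simp
  rw [this]

-- ===== VERDICT (by name: the statement is the Claim_ definition above) =====
theorem count_subsequences_of_101_spec : Claim_equal_count_subsequences_of_101 := by
  intro s _
  show count_subsequences_of_101 s = count_subsequences_of_101_alt s
  unfold count_subsequences_of_101
  show PySem.List.pyGetD (s.toList.foldl (fun table c => pvInnerA c "101".toList table 1) [0, 0, 0]) 2 0 = _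
  rw [pvFoldA_triple, pvAltFold, pvCountOnes]
  have h := pvKey s.toList ((s.toList.count '1' : Int)) 0 0 0 0 (by ring) (by ring)
  rw [h]
  simp [PySem.List.pyGetD, PySem.List.pyGet?, PySem.List.pyIdx?]
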